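-- pv_equiv track=rewrite | github.com/nskybytskyi/adventofcode | 2023/11/main.py | find_row_frequencies
-- ===== SOURCE A (Python) =====
-- def find_row_frequencies(
--     grid: list[str], expansion_factor: int
-- ) -> list[tuple[int, int]]:
--     row_frequencies = []
--     expanded_row = 0
--
--     for row in grid:
--         if frequency := row.count("#"):
--             expanded_row += 1
--             row_frequencies.append((expanded_row, frequency))
--         else:
--             expanded_row += expansion_factor
--
--     return row_frequencies
-- ===== SOURCE B (Python) =====
-- def find_row_frequencies(
--     grid: list[str], expansion_factor: int
-- ) -> list[tuple[int, int]]: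
--     # closed form: the j-th galaxy row (1-based) at original index i lands at
--     # expansion_factor*(i+1) + (1-expansion_factor)*j, because the first i+1
--     # rows are j galaxy rows (width 1) and i+1-j empty rows (width factor).
--     galaxies = [(i, f) for i, row in enumerate(grid) if (f := row.count("#"))]
--     return [
--         (expansion_factor * (i + 1) + (1 - expansion_factor) * j, f)
--         for j, (i, f) in enumerate(galaxies, 1)
--     ]
-- ===== Notes on version B (the rewrite author's own statement) =====
-- stated objective: alternative
-- what changed: Replaced A's running position accumulator with a closed arithmetic formula: collect (index, count) for galaxy rows, then compute each expanded position directly as expansion_factor*(i+1) + (1-expansion_factor)*j from the row index i and galaxy ordinal j, with no accumulated state at all.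
import Mathlib
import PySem

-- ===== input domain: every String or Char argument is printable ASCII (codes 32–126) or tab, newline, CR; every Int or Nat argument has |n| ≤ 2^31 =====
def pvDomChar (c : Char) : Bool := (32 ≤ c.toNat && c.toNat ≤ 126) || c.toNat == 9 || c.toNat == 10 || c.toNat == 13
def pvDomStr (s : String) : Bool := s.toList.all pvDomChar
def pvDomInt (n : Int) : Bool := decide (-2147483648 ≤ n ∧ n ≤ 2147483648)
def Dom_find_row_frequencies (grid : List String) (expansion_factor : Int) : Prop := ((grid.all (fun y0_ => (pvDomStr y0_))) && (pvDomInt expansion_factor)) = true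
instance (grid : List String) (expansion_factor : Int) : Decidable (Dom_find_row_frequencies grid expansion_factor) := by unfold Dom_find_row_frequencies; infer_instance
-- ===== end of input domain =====

-- B drops A's running position accumulator entirely and computes each galaxy row's
-- expanded position by a closed arithmetic formula from its row index and galaxy
-- ordinal (objective: alternative, same cost).

-- ===== PORT A =====
def find_row_frequencies (grid : List String) (expansion_factor : Int) : List (Int × Int) :=
  (grid.foldl
    (fun (st : List (Int × Int) × Int) row =>
      let frequency : Int := (PySem.Str.count row "#" : Int)
      if frequency ≠ 0 then
        (st.1 ++ [(st.2 + 1, frequency)], st.2 + 1)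
      else
        (st.1, st.2 + expansion_factor))
    ([], 0)).1

-- ===== PORT B =====
def find_row_frequencies_alt (grid : List String) (expansion_factor : Int) : List (Int × Int) :=
  let galaxies : List (Int × Int) :=
    (PySem.List.enumerate grid 0).filterMap (fun p =>
      let f : Int := (PySem.Str.count p.2 "#" : Int)
      if f ≠ 0 then some (p.1, f) else none)
  (PySem.List.enumerate galaxies 1).map (fun q =>
    (expansion_factor * (q.2.1 + 1) + (1 - expansion_factor) * q.1, q.2.2))

-- ===== PRECONDITION & SPEC =====
def Spec_find_row_frequencies (grid : List String) (expansion_factor : Int) (out : List (Int × Int)) : Prop := out = find_row_frequencies_alt grid expansion_factor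
instance (grid : List String) (expansion_factor : Int) (out : List (Int × Int)) : Decidable (Spec_find_row_frequencies grid expansion_factor out) := by unfold Spec_find_row_frequencies; infer_instance

-- ===== CLAIM (what is proved, stated in full; the proofs are below) =====
def Claim_equal_find_row_frequencies : Prop := ∀ (grid : List String) (expansion_factor : Int), Dom_find_row_frequencies grid expansion_factor → Spec_find_row_frequencies grid expansion_factor (find_row_frequencies grid expansion_factor)

-- ===== LEMMAS AND PROOFS =====

-- galaxies of `grid` when its first row has original index `i0`
def pvGal (grid : List String) (i0 : Int) : List (Int × Int) :=
  (PySem.List.enumerate grid i0).filterMap (fun p =>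
    let f : Int := (PySem.Str.count p.2 "#" : Int)
    if f ≠ 0 then some (p.1, f) else none)

theorem pvGal_cons (row : String) (rest : List String) (i0 : Int) :
    pvGal (row :: rest) i0 =
      (if (PySem.Str.count row "#" : Int) ≠ 0
        then [((i0 : Int), (PySem.Str.count row "#" : Int))] else []) ++ pvGal rest (i0 + 1) := by
  simp only [pvGal, PySem.List.enumerate_cons, List.filterMap_cons]
  split_ifs with h <;> simp

theorem find_row_frequencies_invariant (expansion_factor : Int) (grid : List String)
    (acc : List (Int × Int)) (i0 j0 : Int) :
    (grid.foldl
      (fun (st : List (Int × Int) × Int) row =>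
        let frequency : Int := (PySem.Str.count row "#" : Int)
        if frequency ≠ 0 then
          (st.1 ++ [(st.2 + 1, frequency)], st.2 + 1)
        else
          (st.1, st.2 + expansion_factor))
      (acc, expansion_factor * i0 + (1 - expansion_factor) * j0)).1 =
    acc ++ (PySem.List.enumerate (pvGal grid i0) (j0 + 1)).map (fun q =>
      (expansion_factor * (q.2.1 + 1) + (1 - expansion_factor) * q.1, q.2.2)) := by
  induction grid generalizing acc i0 j0 with
  | nil => simp [pvGal]
  | cons row rest ih =>
    by_cases h : (PySem.Str.count row "#" : Int) ≠ 0
    · have e1 : expansion_factor * i0 + (1 - expansion_factor) * j0 + 1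
          = expansion_factor * (i0 + 1) + (1 - expansion_factor) * (j0 + 1) := by ring
      simp only [List.foldl_cons, pvGal_cons, if_pos h, List.singleton_append,
        PySem.List.enumerate_cons, List.map_cons]
      rw [e1, ih (acc ++ [(expansion_factor * (i0 + 1) + (1 - expansion_factor) * (j0 + 1),
        (PySem.Str.count row "#" : Int))]) (i0 + 1) (j0 + 1)]
      simp [List.append_assoc]
    · simp only [List.foldl_cons, pvGal_cons, if_neg h, List.nil_append]
      have e1 : expansion_factor * i0 + (1 - expansion_factor) * j0 + expansion_factor
          = expansion_factor * (i0 + 1) + (1 - expansion_factor) * j0 := by ring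
      rw [e1]
      exact ih acc (i0 + 1) j0

-- ===== VERDICT (by name: the statement is the Claim_ definition above) =====
theorem find_row_frequencies_spec : Claim_equal_find_row_frequencies := by
  intro grid expansion_factor _
  unfold Spec_find_row_frequencies find_row_frequencies find_row_frequencies_alt
  have h := find_row_frequencies_invariant expansion_factor grid [] 0 0
  simpa [pvGal] using h
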